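-- pv_equiv track=rewrite | github.com/vladimir-ponomarenko/Sibsutis | OSMS/rgr/dop.py | generate_gold_sequence
-- ===== SOURCE A (Python) =====
-- def generate_gold_sequence(reg1_init, reg2_init, seq_length):
--     reg1 = reg1_init[:]
--     reg2 = reg2_init[:]
--     gold_sequence = []
--
--     for _ in range(seq_length):
--         out_reg1 = reg1[4]
--         out_reg2 = reg2[4]
--
--         feedback1 = reg1[1] ^ reg1[4]
--         reg1 = [feedback1] + reg1[:-1]
--
--         feedback2 = reg2[0] ^ reg2[1] ^ reg2[2]
--         reg2 = [feedback2] + reg2[:-1]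
--
--         gold_sequence.append(out_reg1 ^ out_reg2)
--
--     return gold_sequence
-- ===== SOURCE B (Python) =====
-- def run_lfsr(init, output_index, feedback_indices, seq_length):
--     reg = init[:]
--     out = []
--     for _ in range(seq_length):
--         out.append(reg[output_index])
--         fb = 0
--         for i in feedback_indices:
--             fb ^= reg[i]
--         reg = [fb] + reg[:-1]
--     return out
--
--
-- def generate_gold_sequence(reg1_init, reg2_init, seq_length):
--     seq1 = run_lfsr(reg1_init, 4, [1, 4], seq_length)
--     seq2 = run_lfsr(reg2_init, 4, [0, 1, 2], seq_length)
--     return [a ^ b for a, b in zip(seq1, seq2)]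
-- ===== Notes on version B (the rewrite author's own statement) =====
-- stated objective: simpler
-- what changed: Decomposed A's single interleaved loop into a reusable run_lfsr helper (parameterised by output index and feedback taps) run once per register, with the Gold sequence obtained by XOR-zipping the two independent output streams.
import Mathlib
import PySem

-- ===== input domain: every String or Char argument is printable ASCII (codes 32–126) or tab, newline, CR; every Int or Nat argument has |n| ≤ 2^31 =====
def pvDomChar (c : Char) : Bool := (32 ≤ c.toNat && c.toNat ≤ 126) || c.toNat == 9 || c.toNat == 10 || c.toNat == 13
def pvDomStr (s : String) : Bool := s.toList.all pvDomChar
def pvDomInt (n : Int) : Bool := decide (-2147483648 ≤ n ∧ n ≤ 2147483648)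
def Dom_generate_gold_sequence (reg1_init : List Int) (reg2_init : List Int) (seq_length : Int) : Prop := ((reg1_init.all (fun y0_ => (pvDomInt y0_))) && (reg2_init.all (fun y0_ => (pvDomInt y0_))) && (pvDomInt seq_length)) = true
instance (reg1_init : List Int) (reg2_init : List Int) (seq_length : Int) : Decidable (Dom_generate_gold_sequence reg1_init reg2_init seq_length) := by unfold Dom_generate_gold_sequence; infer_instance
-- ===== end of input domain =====

-- B replaces A's single interleaved loop with a reusable run_lfsr helper called once per register plus an XOR zip (objective: simpler decomposition; no arguments are mutated).


-- ===== PORT A =====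
-- One interleaved loop: each step reads both registers' bit 4, shifts both, appends the XOR.
def goldLoopA : Nat → List Int → List Int → List Int → List Int
  | 0, _, _, acc => acc
  | n+1, reg1, reg2, acc =>
    let out_reg1 := PySem.List.pyGetD reg1 4 0   -- reg1[4]; Pre_ rules out the IndexError case
    let out_reg2 := PySem.List.pyGetD reg2 4 0
    let feedback1 := PySem.Int.bxor (PySem.List.pyGetD reg1 1 0) (PySem.List.pyGetD reg1 4 0)
    let reg1' := feedback1 :: PySem.List.slice reg1 none (some (-1))
    let feedback2 := PySem.Int.bxor (PySem.Int.bxor (PySem.List.pyGetD reg2 0 0) (PySem.List.pyGetD reg2 1 0)) (PySem.List.pyGetD reg2 2 0)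
    let reg2' := feedback2 :: PySem.List.slice reg2 none (some (-1))
    goldLoopA n reg1' reg2' (acc ++ [PySem.Int.bxor out_reg1 out_reg2])

def generate_gold_sequence (reg1_init : List Int) (reg2_init : List Int) (seq_length : Int) : List Int :=
  goldLoopA seq_length.toNat reg1_init reg2_init []

-- ===== PORT B =====
-- run_lfsr: one register, one pass; feedback = fold of XOR over the tap indices.
def runLfsr : List Int → Int → List Int → Nat → List Int
  | _, _, _, 0 => []
  | reg, outIdx, taps, n+1 =>
    let out := PySem.List.pyGetD reg outIdx 0    -- reg[output_index]; Pre_ rules out the IndexError case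
    let fb := taps.foldl (fun acc i => PySem.Int.bxor acc (PySem.List.pyGetD reg i 0)) 0
    out :: runLfsr (fb :: PySem.List.slice reg none (some (-1))) outIdx taps n

def generate_gold_sequence_alt (reg1_init : List Int) (reg2_init : List Int) (seq_length : Int) : List Int :=
  let seq1 := runLfsr reg1_init 4 [1, 4] seq_length.toNat
  let seq2 := runLfsr reg2_init 4 [0, 1, 2] seq_length.toNat
  (seq1.zip seq2).map (fun p => PySem.Int.bxor p.1 p.2)

-- ===== PRECONDITION & SPEC =====
-- Pre_ excludes exactly the inputs where Python A raises IndexError: a positive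
-- seq_length with a register shorter than 5 (both programs index position 4 each step).
def Pre_generate_gold_sequence (reg1_init : List Int) (reg2_init : List Int) (seq_length : Int) : Prop :=
  0 < seq_length → (5 ≤ reg1_init.length ∧ 5 ≤ reg2_init.length)
instance (reg1_init : List Int) (reg2_init : List Int) (seq_length : Int) : Decidable (Pre_generate_gold_sequence reg1_init reg2_init seq_length) := by unfold Pre_generate_gold_sequence; infer_instance

def pvWitness_generate_gold_sequence : List Int × List Int × Int := ([1, 0, 1, 0, 1], [0, 1, 1, 0, 0], 7)

def Spec_generate_gold_sequence (reg1_init : List Int) (reg2_init : List Int) (seq_length : Int) (out : List Int) : Prop := out = generate_gold_sequence_alt reg1_init reg2_init seq_length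
instance (reg1_init : List Int) (reg2_init : List Int) (seq_length : Int) (out : List Int) : Decidable (Spec_generate_gold_sequence reg1_init reg2_init seq_length out) := by unfold Spec_generate_gold_sequence; infer_instance

-- ===== CLAIM (what is proved, stated in full; the proofs are below) =====
def Claim_equal_generate_gold_sequence : Prop := ∀ (reg1_init : List Int) (reg2_init : List Int) (seq_length : Int), Dom_generate_gold_sequence reg1_init reg2_init seq_length → Pre_generate_gold_sequence reg1_init reg2_init seq_length → Spec_generate_gold_sequence reg1_init reg2_init seq_length (generate_gold_sequence reg1_init reg2_init seq_length)

-- ===== LEMMAS AND PROOFS =====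


-- The interleaved loop is the zip of the two independent LFSR streams.
theorem goldLoopA_eq (n : Nat) : ∀ (r1 r2 acc : List Int),
    goldLoopA n r1 r2 acc =
      acc ++ ((runLfsr r1 4 [1, 4] n).zip (runLfsr r2 4 [0, 1, 2] n)).map
        (fun p => PySem.Int.bxor p.1 p.2) := by
  induction n with
  | zero => intro r1 r2 acc; simp [goldLoopA, runLfsr]
  | succ n ih =>
    intro r1 r2 acc
    simp only [goldLoopA, runLfsr, ih, List.foldl, List.zip_cons_cons, List.map_cons,
      List.append_assoc, List.singleton_append]
    rw [PySem.Int.bxor_comm 0 (PySem.List.pyGetD r1 1 0),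
        PySem.Int.bxor_comm 0 (PySem.List.pyGetD r2 0 0)]
    simp [PySem.Int.bxor_zero]

-- ===== VERDICT (by name: the statement is the Claim_ definition above) =====
theorem generate_gold_sequence_spec : Claim_equal_generate_gold_sequence := by
  intro r1 r2 n _ _
  unfold Spec_generate_gold_sequence generate_gold_sequence generate_gold_sequence_alt
  simpa using goldLoopA_eq n.toNat r1 r2 []
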